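-- pv_equiv track=rewrite | github.com/fx4100/shitcrypt | shit.py | chunkify_exact
-- ===== SOURCE A (Python) =====
-- def chunkify_exact(lst, parts):
--     n = len(lst)
--     if n == 0:
--         return []
--     base = n // parts
--     rem = n % parts
--     chunks = []
--     i = 0
--     for p in range(parts):
--         size = base + (1 if p < rem else 0)
--         if size == 0:
--             chunks.append(([], i))
--         else:
--             chunk = lst[i:i+size]
--             chunks.append((chunk, i))
--         i += size
--     return chunks
-- ===== SOURCE B (Python) =====
-- def chunkify_exact(lst, parts):
--     n = len(lst)
--     if n == 0:
--         return []
--     base, rem = divmod(n, parts)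
--     def bnd(p):
--         return p * base + min(p, rem)
--     return [(lst[bnd(p):bnd(p + 1)], bnd(p)) for p in range(parts)]
-- ===== Notes on version B (the rewrite author's own statement) =====
-- stated objective: alternative
-- what changed: B replaces A's loop threading a running offset and size accumulator with closed-form chunk boundaries bnd(p)=p*base+min(p,rem) and a single comprehension slicing between consecutive boundaries.
import Mathlib
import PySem

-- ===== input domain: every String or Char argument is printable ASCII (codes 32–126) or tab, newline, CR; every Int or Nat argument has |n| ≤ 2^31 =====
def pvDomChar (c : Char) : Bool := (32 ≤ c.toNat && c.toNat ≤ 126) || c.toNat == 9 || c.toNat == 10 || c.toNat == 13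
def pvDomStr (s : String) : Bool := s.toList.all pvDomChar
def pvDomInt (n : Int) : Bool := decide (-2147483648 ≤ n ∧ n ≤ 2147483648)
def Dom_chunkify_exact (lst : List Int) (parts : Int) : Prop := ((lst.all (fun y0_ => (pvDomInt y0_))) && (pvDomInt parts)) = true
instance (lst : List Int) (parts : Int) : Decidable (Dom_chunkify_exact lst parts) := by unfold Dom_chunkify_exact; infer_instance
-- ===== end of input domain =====

-- B replaces A's running-offset loop by closed-form chunk boundaries bnd(p)=p*base+min(p,rem)
-- and a single comprehension; same behaviour, alternative decomposition (no speed claim).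

-- ===== PORT A =====
-- loop body of A's for-loop: state = (chunks, i)
def stepA (lst : List Int) (base rem : Int) (st : List (List Int × Int) × Int) (p : Int) :
    List (List Int × Int) × Int :=
  let size := base + (if p < rem then 1 else 0)
  if size = 0 then (st.1 ++ [([], st.2)], st.2 + size)
  else (st.1 ++ [(PySem.List.slice lst (some st.2) (some (st.2 + size)), st.2)], st.2 + size)

def chunkify_exact (lst : List Int) (parts : Int) : List (List Int × Int) :=
  if PySem.List.len lst = 0 then []
  else
    ((PySem.List.pyRange 0 parts 1).foldl
      (stepA lst (PySem.Int.floordiv (PySem.List.len lst) parts)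
                 (PySem.Int.mod (PySem.List.len lst) parts)) ([], 0)).1

-- ===== PORT B =====
-- bnd(p) = p * base + min(p, rem), the closed-form boundary
def bndB (base rem p : Int) : Int := p * base + min p rem

-- one element of B's comprehension
def elemB (lst : List Int) (base rem p : Int) : List Int × Int :=
  (PySem.List.slice lst (some (bndB base rem p)) (some (bndB base rem (p + 1))), bndB base rem p)

def chunkify_exact_alt (lst : List Int) (parts : Int) : List (List Int × Int) :=
  if PySem.List.len lst = 0 then []
  else
    (PySem.List.pyRange 0 parts 1).map
      (elemB lst (PySem.Int.floordiv (PySem.List.len lst) parts)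
                 (PySem.Int.mod (PySem.List.len lst) parts))

-- ===== PRECONDITION & SPEC =====
-- Pre_ excludes only parts = 0 with a nonempty list, where both Pythons raise ZeroDivisionError.
def Pre_chunkify_exact (lst : List Int) (parts : Int) : Prop := lst = [] ∨ parts ≠ 0
instance (lst : List Int) (parts : Int) : Decidable (Pre_chunkify_exact lst parts) := by unfold Pre_chunkify_exact; infer_instance
def pvWitness_chunkify_exact : List Int × Int := ([1, 2, 3, 4, 5], 3)

def Spec_chunkify_exact (lst : List Int) (parts : Int) (out : List (List Int × Int)) : Prop := out = chunkify_exact_alt lst parts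
instance (lst : List Int) (parts : Int) (out : List (List Int × Int)) : Decidable (Spec_chunkify_exact lst parts out) := by unfold Spec_chunkify_exact; infer_instance

-- ===== CLAIM (what is proved, stated in full; the proofs are below) =====
def Claim_equal_chunkify_exact : Prop := ∀ (lst : List Int) (parts : Int), Dom_chunkify_exact lst parts → Pre_chunkify_exact lst parts → Spec_chunkify_exact lst parts (chunkify_exact lst parts)

-- ===== LEMMAS AND PROOFS =====

-- a zero-width slice is empty (both clamped bounds coincide)
lemma slice_self (xs : List Int) (a : Int) : PySem.List.slice xs (some a) (some a) = [] := by
  apply List.eq_nil_of_length_eq_zero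
  rw [PySem.List.length_slice]
  omega

-- one loop step of A, started at boundary bnd p, appends exactly B's element and lands at bnd (p+1)
lemma stepA_eq (lst : List Int) (base rem p : Int) (acc : List (List Int × Int)) :
    stepA lst base rem (acc, bndB base rem p) p =
      (acc ++ [elemB lst base rem p], bndB base rem (p + 1)) := by
  have hb : bndB base rem (p + 1) = bndB base rem p + (base + (if p < rem then 1 else 0)) := by
    have h1 : (p + 1) * base = p * base + base := by ring
    unfold bndB; rw [h1]; split_ifs with h <;> omega
  unfold stepA elemB
  by_cases hz : base + (if p < rem then 1 else 0) = 0
  · simp only [hz, if_true]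
    have heq : bndB base rem (p + 1) = bndB base rem p := by omega
    rw [heq, slice_self]
    simp
  · simp only [if_neg hz]
    rw [hb]

-- the loop invariant: after the first k iterations A's state is (B's first k elements, bnd k)
lemma loop_eq (lst : List Int) (base rem : Int) (hr : 0 ≤ rem) (k : Nat) :
    (PySem.List.pyRange 0 (k : Int) 1).foldl (stepA lst base rem) ([], 0) =
      ((PySem.List.pyRange 0 (k : Int) 1).map (elemB lst base rem), bndB base rem (k : Int)) := by
  induction k with
  | zero =>
    rw [PySem.List.pyRange_one_eq_nil (by omega)]
    simp [bndB, min_eq_left hr]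
  | succ k ih =>
    have hsplit : PySem.List.pyRange 0 ((k : Int) + 1) 1 =
        PySem.List.pyRange 0 (k : Int) 1 ++ [(k : Int)] :=
      PySem.List.pyRange_one_succ_right (by omega)
    push_cast
    rw [hsplit, List.foldl_append, List.map_append, ih]
    simp only [List.foldl_cons, List.foldl_nil, List.map_cons, List.map_nil]
    rw [stepA_eq]

-- ===== VERDICT (by name: the statement is the Claim_ definition above) =====
theorem chunkify_exact_spec : Claim_equal_chunkify_exact := by
  intro lst parts _ _
  unfold Spec_chunkify_exact chunkify_exact chunkify_exact_alt
  by_cases h0 : PySem.List.len lst = 0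
  · rw [if_pos h0, if_pos h0]
  · rw [if_neg h0, if_neg h0]
    by_cases hp : parts ≤ 0
    · rw [PySem.List.pyRange_one_eq_nil (by omega)]
      simp
    · have hr : 0 ≤ PySem.Int.mod (PySem.List.len lst) parts := by
        apply PySem.Int.mod_nonneg; omega
      have hparts : parts = (parts.toNat : Int) := by omega
      rw [hparts] at hr ⊢
      rw [loop_eq lst _ _ hr]
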